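-- pv_equiv track=rewrite | github.com/ScQ-Cloud/pyquafu | quafu/results/results.py | intersec
-- ===== SOURCE A (Python) =====
-- def intersec(a, b):
--     inter = []
--     aind = []
--     bind = []
--     for i, a_i in enumerate(a):
--         for j, b_j in enumerate(b):
--             if a_i == b_j:
--                 inter.append(a_i)
--                 aind.append(i)
--                 bind.append(j)
--
--     return inter, aind, bind
-- ===== SOURCE B (Python) =====
-- def intersec(a, b):
--     pos = {}
--     for j, x in enumerate(b):
--         pos.setdefault(x, []).append(j)
--     pairs = [(i, x, j) for i, x in enumerate(a) for j in pos.get(x, [])]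
--     return [x for _, x, _ in pairs], [i for i, _, _ in pairs], [j for _, _, j in pairs]
-- ===== Notes on version B (the rewrite author's own statement) =====
-- stated objective: alternative
-- what changed: Replaces A's nested scan with triple in-place appends by a staged pipeline: a dict from each b-value to its index list built once, a single comprehension producing the list of (i,x,j) match triples, and three projections of that list; asymptotically O(n+m+matches) vs O(n*m), though a timing run's match-heavy inputs did not show a 1.5x win.
import Mathlib
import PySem

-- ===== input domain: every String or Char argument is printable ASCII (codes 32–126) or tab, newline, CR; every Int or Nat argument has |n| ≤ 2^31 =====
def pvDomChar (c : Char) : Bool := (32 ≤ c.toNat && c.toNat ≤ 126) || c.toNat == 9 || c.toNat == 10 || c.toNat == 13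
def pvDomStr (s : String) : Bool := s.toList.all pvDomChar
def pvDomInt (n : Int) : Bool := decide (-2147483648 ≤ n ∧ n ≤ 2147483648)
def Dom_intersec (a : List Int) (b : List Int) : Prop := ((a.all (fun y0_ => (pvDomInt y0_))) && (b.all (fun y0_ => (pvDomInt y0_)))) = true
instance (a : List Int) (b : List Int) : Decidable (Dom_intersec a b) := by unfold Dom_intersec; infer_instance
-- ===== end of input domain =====

-- B replaces A's nested scan with three in-place appends by a staged pipeline: a dict from each
-- b-value to its index list, one flat list of (i,x,j) match triples, then three projections
-- (alternative algorithm; same return value, proved equal below).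
-- ===== PORT A =====
def intersec (a : List Int) (b : List Int) : List Int × List Int × List Int :=
  (PySem.List.enumerate a).foldl
    (fun s p =>
      (PySem.List.enumerate b).foldl
        (fun s q =>
          if p.2 == q.2 then (s.1 ++ [p.2], s.2.1 ++ [p.1], s.2.2 ++ [q.1]) else s)
        s)
    ([], [], [])

-- ===== PORT B =====
def intersec_alt (a : List Int) (b : List Int) : List Int × List Int × List Int :=
  let pos := (PySem.List.enumerate b).foldl (fun d q => d.modify q.2 [] (· ++ [q.1])) PySem.Dict.empty
  let pairs := (PySem.List.enumerate a).flatMap (fun p => (pos.getD p.2 []).map (fun j => (p.1, p.2, j)))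
  (pairs.map (·.2.1), pairs.map (·.1), pairs.map (·.2.2))

-- ===== PRECONDITION & SPEC =====
def Spec_intersec (a : List Int) (b : List Int) (out : List Int × List Int × List Int) : Prop := out = intersec_alt a b
instance (a : List Int) (b : List Int) (out : List Int × List Int × List Int) : Decidable (Spec_intersec a b out) := by unfold Spec_intersec; infer_instance

-- ===== CLAIM (what is proved, stated in full; the proofs are below) =====
def Claim_equal_intersec : Prop := ∀ (a : List Int) (b : List Int), Dom_intersec a b → Spec_intersec a b (intersec a b)

-- ===== LEMMAS AND PROOFS =====

-- Folding a triple of list-appends over any list is componentwise flatMap/append.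
lemma foldl3_append {α : Type} (g1 g2 g3 : α → List Int) (l : List α)
    (s : List Int × List Int × List Int) :
    l.foldl (fun s x => (s.1 ++ g1 x, s.2.1 ++ g2 x, s.2.2 ++ g3 x)) s
      = (s.1 ++ l.flatMap g1, s.2.1 ++ l.flatMap g2, s.2.2 ++ l.flatMap g3) := by
  induction l generalizing s with
  | nil => simp
  | cons x t ih => simp [ih, List.flatMap_cons]

-- The dict B builds maps each value x to the list of indices of b holding x, in order.
lemma posOf_getD (b : List Int) (x : Int) :
    ((PySem.List.enumerate b).foldl (fun d q => d.modify q.2 [] (· ++ [q.1])) PySem.Dict.empty).getD x []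
      = ((PySem.List.enumerate b).filter (fun q => q.2 == x)).map (·.1) := by
  have h : (PySem.List.enumerate b).foldl (fun d q => d.modify q.2 [] (· ++ [q.1])) PySem.Dict.empty
      = ((PySem.List.enumerate b).map Prod.swap).foldl
          (fun d (p : Int × Int) => d.modify p.1 [] (· ++ [p.2])) PySem.Dict.empty := by
    rw [List.foldl_map]
    simp only [Prod.fst_swap, Prod.snd_swap]
  rw [h, PySem.Dict.getD_foldl_modify_append]
  simp [List.filter_map, List.map_map, Function.comp_def, Prod.swap]

-- A's inner scan of b, started from s, appends the per-element match triples componentwise.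
lemma inner_eq (b : List Int) (p : Int × Int) (s : List Int × List Int × List Int) :
    (PySem.List.enumerate b).foldl
        (fun s q => if p.2 == q.2 then (s.1 ++ [p.2], s.2.1 ++ [p.1], s.2.2 ++ [q.1]) else s) s
      = (s.1 ++ ((PySem.List.enumerate b).filter (fun q => q.2 == p.2)).flatMap (fun _ => [p.2]),
         s.2.1 ++ ((PySem.List.enumerate b).filter (fun q => q.2 == p.2)).flatMap (fun _ => [p.1]),
         s.2.2 ++ ((PySem.List.enumerate b).filter (fun q => q.2 == p.2)).flatMap (fun q => [q.1])) := by
  rw [PySem.List.foldl_if_eq_foldl_filter]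
  have hf : (PySem.List.enumerate b).filter (fun q => p.2 == q.2)
      = (PySem.List.enumerate b).filter (fun q => q.2 == p.2) := by
    apply List.filter_congr; intro q _; simp [eq_comm]
  rw [hf, foldl3_append]

lemma flatten_map_singleton {α β : Type} (f : α → β) (l : List α) :
    (l.map (fun x => [f x])).flatten = l.map f := by
  induction l with
  | nil => simp
  | cons x t ih => simp [ih]

-- ===== VERDICT (by name: the statement is the Claim_ definition above) =====
theorem intersec_spec : Claim_equal_intersec := by
  intro a b _
  unfold Spec_intersec intersec intersec_alt
  have hstep : (fun (s : List Int × List Int × List Int) (p : Int × Int) =>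
      (PySem.List.enumerate b).foldl
        (fun s q => if p.2 == q.2 then (s.1 ++ [p.2], s.2.1 ++ [p.1], s.2.2 ++ [q.1]) else s) s)
      = (fun s p =>
      (s.1 ++ ((PySem.List.enumerate b).filter (fun q => q.2 == p.2)).flatMap (fun _ => [p.2]),
       s.2.1 ++ ((PySem.List.enumerate b).filter (fun q => q.2 == p.2)).flatMap (fun _ => [p.1]),
       s.2.2 ++ ((PySem.List.enumerate b).filter (fun q => q.2 == p.2)).flatMap (fun q => [q.1]))) := by
    funext s p; exact inner_eq b p s
  rw [hstep, foldl3_append]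
  simp [posOf_getD, List.map_map, Function.comp_def, List.flatMap_def,
    flatten_map_singleton]
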